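-- pv_equiv track=rewrite | github.com/MinsangKong/DailyProblem | 06-24/3.py | bfs
-- ===== SOURCE A (Python) =====
-- from collections import deque
--
-- def bfs(target):
--     q = deque()
--     q.append([2,2,1])
--     visited = [[int(1e9)]*2001 for _ in range(2001)] #속도를 개선하려면 set으로 방문 여부 체크
--     visited[1][1] = 1
--     visited[2][1] = 2
--     while q :
--         sec, display, board = q.popleft()
--         if display == target:
--             return sec
--
--         if 2 <= display+board <= 2000 and visited[display+board][board] > sec+1:
--             visited[display+board][board] = sec+1
--             q.append([sec+1, display+board, board])
--         if 2 <= display-1 <= 2000 and visited[display-1][board] > sec+1: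
--             visited[display-1][board] = sec+1
--             q.append([sec+1, display-1, board])
--         if 2 <= display <= 2000 and visited[display][display] > sec+1:
--             visited[display][display] = sec+1
--             q.append([sec+1,display,display])
-- ===== SOURCE B (Python) =====
-- def bfs(target):
--     # Multi-source REVERSE BFS: start from every state (target, board) and walk the
--     # reversed moves until the start state (2, 1) is found; answer = 2 + levels.
--     visited = [[False] * 2001 for _ in range(2001)]
--     frontier = []
--     if 2 <= target <= 2000:
--         for b in range(1, 2001):
--             visited[target][b] = True
--             frontier.append((target, b))
--     depth = 2
--     while frontier:
--         if (2, 1) in frontier: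
--             return depth
--         nxt = []
--         for d, b in frontier:
--             if d - b >= 2 and not visited[d - b][b]:      # reverse of paste
--                 visited[d - b][b] = True
--                 nxt.append((d - b, b))
--             if d + 1 <= 2000 and not visited[d + 1][b]:   # reverse of delete
--                 visited[d + 1][b] = True
--                 nxt.append((d + 1, b))
--             if d == b:                                    # reverse of copy
--                 for b2 in range(1, 2001):
--                     if not visited[d][b2]:
--                         visited[d][b2] = True
--                         nxt.append((d, b2))
--         frontier = nxt
--         depth += 1
--     return None
-- ===== Notes on version B (the rewrite author's own statement) =====
-- stated objective: alternative
-- what changed: Replaces A's forward BFS from (2,1) (a deque of [sec,display,board] triples with a 2001x2001 integer distance array) by a multi-source REVERSE BFS: it seeds every state (target, board), walks the three moves backwards (reverse paste (d-b,b), reverse delete (d+1,b), and reverse copy fanning a diagonal state (d,d) out to all (d,b2)) level by level with a depth counter and a boolean visited table, and returns when the start state (2,1) is reached; out-of-range targets yield an empty source set and None.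
import Mathlib
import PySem

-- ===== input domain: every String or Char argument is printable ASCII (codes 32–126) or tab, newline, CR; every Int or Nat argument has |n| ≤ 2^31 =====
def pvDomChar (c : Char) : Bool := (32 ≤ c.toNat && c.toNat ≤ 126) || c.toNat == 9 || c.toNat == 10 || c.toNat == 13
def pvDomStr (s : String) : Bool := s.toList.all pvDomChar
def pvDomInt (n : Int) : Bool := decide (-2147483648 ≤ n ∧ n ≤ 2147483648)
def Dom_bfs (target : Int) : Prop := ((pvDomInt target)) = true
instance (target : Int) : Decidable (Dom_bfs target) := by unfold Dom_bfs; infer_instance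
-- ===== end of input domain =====

set_option maxRecDepth 100000


-- B replaces A's forward BFS from (2,1) (deque of [sec,display,board] triples, 2D distance
-- array) by a multi-source REVERSE BFS: it starts from every state (target, board) and walks
-- the reversed moves level by level until it meets the start state (2,1); same return value.

-- Shared 2D-table primitives: Python's `t[i][j]` read and `t[i][j] = x` write on a
-- rectangular list-of-lists (ported as Array of Arrays for in-place update; all indices
-- used by both programs are within bounds, so the getD defaults are never returned).
def pvAget {α : Type} (dflt : α) (v : Array (Array α)) (i j : Int) : α :=
  (((v[i.toNat]?).getD #[])[j.toNat]?).getD dflt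

def pvAset {α : Type} (v : Array (Array α)) (i j : Int) (x : α) : Array (Array α) :=
  v.modify i.toNat (fun row => row.setIfInBounds j.toNat x)

-- Fuel for the two while-loops (used up once per BFS LEVEL; the state space has
-- 1999*2000 = 3998000 cells and a level is only re-entered while at least one cell is
-- newly visited, so 4000000 is never exhausted — proved below via a cardinality bound).
def pvFuel : Nat := 4000000

-- ===== PORT A =====
-- the body of one iteration of A's while-loop after the target test: the three
-- conditional `visited`-updates-and-appends, in source order (appends are conses onto
-- `pend`, the back half of the deque, see bfsLoopA)
def bfsStepA (sec display board : Int) (pend : List (Int × Int × Int))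
    (v : Array (Array Int)) : List (Int × Int × Int) × Array (Array Int) :=
  let s1 := if 2 ≤ display + board ∧ display + board ≤ 2000 ∧
                pvAget 0 v (display + board) board > sec + 1 then
      ((sec + 1, display + board, board) :: pend, pvAset v (display + board) board (sec + 1))
    else (pend, v)
  let s2 := if 2 ≤ display - 1 ∧ display - 1 ≤ 2000 ∧
                pvAget 0 s1.2 (display - 1) board > sec + 1 then
      ((sec + 1, display - 1, board) :: s1.1, pvAset s1.2 (display - 1) board (sec + 1))
    else s1
  let s3 := if 2 ≤ display ∧ display ≤ 2000 ∧
                pvAget 0 s2.2 display display > sec + 1 then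
      ((sec + 1, display, display) :: s2.1, pvAset s2.2 display display (sec + 1))
    else s2
  s3

-- A's `while q:` loop.  `collections.deque` with popleft/append is ported as the standard
-- two-list queue: the deque is `cur ++ pend.reverse`, popleft takes the head of `cur`,
-- append conses onto `pend`; when `cur` runs out the back half is reversed over (one unit
-- of fuel per such flip, i.e. per BFS level).
def bfsLoopA (target : Int) (fuel : Nat) (cur pend : List (Int × Int × Int))
    (v : Array (Array Int)) : Option Int :=
  match cur with
  | (sec, display, board) :: rest =>
      if display = target then some sec
      else
        let r := bfsStepA sec display board pend v
        bfsLoopA target fuel rest r.1 r.2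
  | [] =>
      match pend with
      | [] => none                            -- queue empty: fall out of the loop, return None
      | _ :: _ =>
          match fuel with
          | 0 => none
          | fuel' + 1 => bfsLoopA target fuel' pend.reverse [] v
termination_by (fuel, cur.length)
decreasing_by
  · simp only [List.length_cons]; exact Prod.Lex.right _ (by omega)
  · exact Prod.Lex.left _ _ (by omega)

def bfs (target : Int) : Option Int :=
  -- q = deque([[2,2,1]]); visited = [[int(1e9)]*2001 for _ in range(2001)]
  let v := Array.replicate 2001 (Array.replicate 2001 (1000000000 : Int))
  let v := pvAset v 1 1 1                     -- visited[1][1] = 1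
  let v := pvAset v 2 1 2                     -- visited[2][1] = 2
  bfsLoopA target pvFuel [(2, 2, 1)] [] v

-- ===== PORT B =====
-- the body of `for d, b in frontier:` — the three reverse-move blocks in source order:
-- reverse paste (d-b,b), reverse delete (d+1,b), and for diagonal states the reverse copy
-- inner loop `for b2 in range(1, 2001)`; new states are appended to `nxt` (Array.push)
def altStep (acc : Array (Int × Int) × Array (Array Bool)) (s : Int × Int) :
    Array (Int × Int) × Array (Array Bool) :=
  let d := s.1
  let b := s.2
  let t1 := if d - b ≥ 2 ∧ pvAget false acc.2 (d - b) b = false then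
      (acc.1.push (d - b, b), pvAset acc.2 (d - b) b true)
    else acc
  let t2 := if d + 1 ≤ 2000 ∧ pvAget false t1.2 (d + 1) b = false then
      (t1.1.push (d + 1, b), pvAset t1.2 (d + 1) b true)
    else t1
  if d = b then
    (PySem.List.pyRange 1 2001 1).foldl (fun a b2 =>
        if pvAget false a.2 d b2 = false then (a.1.push (d, b2), pvAset a.2 d b2 true)
        else a) t2
  else t2

-- B's `while frontier:` loop (one unit of fuel per iteration = per reverse-BFS level)
def altLoop (target : Int) (fuel : Nat) (depth : Int) (frontier : List (Int × Int))
    (w : Array (Array Bool)) : Option Int :=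
  match frontier with
  | [] => none
  | _ :: _ =>
      if frontier.contains ((2 : Int), (1 : Int)) then some depth
      else
        let r := frontier.foldl altStep (#[], w)
        match fuel with
        | 0 => none
        | fuel' + 1 => altLoop target fuel' (depth + 1) r.1.toList r.2
termination_by fuel

def bfs_alt (target : Int) : Option Int :=
  let w := Array.replicate 2001 (Array.replicate 2001 false)
  -- if 2 <= target <= 2000: for b in range(1, 2001): mark and append (target, b)
  let init := if 2 ≤ target ∧ target ≤ 2000 then
      (PySem.List.pyRange 1 2001 1).foldl
        (fun a b => (a.1.push (target, b), pvAset a.2 target b true))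
        ((#[] : Array (Int × Int)), w)
    else ((#[] : Array (Int × Int)), w)
  altLoop target pvFuel 2 init.1.toList init.2

-- ===== PRECONDITION & SPEC =====
def Spec_bfs (target : Int) (out : Option Int) : Prop := out = bfs_alt target
instance (target : Int) (out : Option Int) : Decidable (Spec_bfs target out) := by unfold Spec_bfs; infer_instance

-- ===== CLAIM (what is proved, stated in full; the proofs are below) =====
def Claim_equal_bfs : Prop := ∀ (target : Int), Dom_bfs target → Spec_bfs target (bfs target)

-- ===== LEMMAS AND PROOFS =====

-- ---------- the abstract search: a generic level-synchronous BFS ----------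

-- the common state space of both searches: display in [2,2000], board in [1,2000]
noncomputable def Box : Finset (Int × Int) := (Finset.Icc 2 2000) ×ˢ (Finset.Icc 1 2000)

-- forward neighbours (the three guarded moves of A, in order)
def nbF (s : Int × Int) : List (Int × Int) :=
  (if 2 ≤ s.1 + s.2 ∧ s.1 + s.2 ≤ 2000 then [(s.1 + s.2, s.2)] else []) ++
  (if 2 ≤ s.1 - 1 ∧ s.1 - 1 ≤ 2000 then [(s.1 - 1, s.2)] else []) ++
  (if 2 ≤ s.1 ∧ s.1 ≤ 2000 then [(s.1, s.1)] else [])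

-- reverse neighbours (the three guarded blocks of B, in order)
def nbR (s : Int × Int) : List (Int × Int) :=
  (if s.1 - s.2 ≥ 2 then [(s.1 - s.2, s.2)] else []) ++
  (if s.1 + 1 ≤ 2000 then [(s.1 + 1, s.2)] else []) ++
  (if s.1 = s.2 then (PySem.List.pyRange 1 2001 1).map (fun b2 => (s.1, b2)) else [])

-- mark-and-collect one candidate state
def genAdd (acc : List (Int × Int) × Finset (Int × Int)) (t : Int × Int) :
    List (Int × Int) × Finset (Int × Int) :=
  if t ∈ acc.2 then acc else (acc.1 ++ [t], insert t acc.2)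

-- the generic level-synchronous BFS both concrete loops are proved to simulate
def genLoop (nb : Int × Int → List (Int × Int)) (goal : Int × Int → Bool) :
    Nat → Int → List (Int × Int) → Finset (Int × Int) → Option Int
  | fuel, depth, frontier, vis =>
    match frontier with
    | [] => none
    | _ :: _ =>
        if frontier.any goal then some depth
        else
          let r := frontier.foldl (fun acc s => (nb s).foldl genAdd acc) ([], vis)
          match fuel with
          | 0 => none
          | fuel' + 1 => genLoop nb goal fuel' (depth + 1) r.1 r.2
termination_by fuel _ _ _ => fuel

-- the mathematical level sequence: (frontier, visited) after n rounds
def nbSet (nb : Int × Int → List (Int × Int)) (F : Finset (Int × Int)) : Finset (Int × Int) :=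
  F.biUnion (fun s => (nb s).toFinset)

def lev (nb : Int × Int → List (Int × Int)) (F0 : Finset (Int × Int)) :
    Nat → Finset (Int × Int) × Finset (Int × Int)
  | 0 => (F0, F0)
  | n + 1 =>
      (nbSet nb (lev nb F0 n).1 \ (lev nb F0 n).2, (lev nb F0 n).2 ∪ nbSet nb (lev nb F0 n).1)

lemma lev_succ (nb : Int × Int → List (Int × Int)) (F0 : Finset (Int × Int)) (n : Nat) :
    lev nb F0 (n + 1)
      = (nbSet nb (lev nb F0 n).1 \ (lev nb F0 n).2,
         (lev nb F0 n).2 ∪ nbSet nb (lev nb F0 n).1) := rfl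

-- paths and reachability
inductive PathN (nb : Int × Int → List (Int × Int)) : Nat → Int × Int → Int × Int → Prop
  | refl (u : Int × Int) : PathN nb 0 u u
  | snoc {n : Nat} {u v w : Int × Int} : PathN nb n u v → w ∈ nb v → PathN nb (n + 1) u w

def Reach (nb : Int × Int → List (Int × Int)) (F0 : Finset (Int × Int)) (n : Nat)
    (v : Int × Int) : Prop := ∃ u ∈ F0, PathN nb n u v

def Hit (nb : Int × Int → List (Int × Int)) (goal : Int × Int → Bool)
    (F0 : Finset (Int × Int)) (k : Nat) : Prop :=
  ∃ v ∈ (lev nb F0 k).1, goal v = true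

def GHit (nb : Int × Int → List (Int × Int)) (goal : Int × Int → Bool)
    (F0 : Finset (Int × Int)) (k : Nat) : Prop :=
  ∃ v, Reach nb F0 k v ∧ goal v = true

-- ---------- generic lemmas ----------

lemma genAdd_of_mem {acc : List (Int × Int) × Finset (Int × Int)} {t : Int × Int}
    (h : t ∈ acc.2) : genAdd acc t = acc := by simp [genAdd, h]

lemma genAdd_of_not_mem {acc : List (Int × Int) × Finset (Int × Int)} {t : Int × Int}
    (h : ¬ t ∈ acc.2) : genAdd acc t = (acc.1 ++ [t], insert t acc.2) := by
  simp [genAdd, h]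

lemma addList_spec (ts : List (Int × Int)) (acc : List (Int × Int) × Finset (Int × Int)) :
    (ts.foldl genAdd acc).2 = acc.2 ∪ ts.toFinset ∧
    (ts.foldl genAdd acc).1.toFinset = acc.1.toFinset ∪ (ts.toFinset \ acc.2) := by
  induction ts generalizing acc with
  | nil => simp
  | cons t ts ih =>
      by_cases h : t ∈ acc.2
      · rw [List.foldl_cons, genAdd_of_mem h]
        rcases ih acc with ⟨h2, h1⟩
        constructor
        · rw [h2]
          ext x
          by_cases hx : x = t
          · subst hx; simp [h]
          · simp [hx]
        · rw [h1]
          ext x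
          by_cases hx : x = t
          · subst hx; simp [h]
          · simp [hx]
      · rw [List.foldl_cons, genAdd_of_not_mem h]
        rcases ih (acc.1 ++ [t], insert t acc.2) with ⟨h2, h1⟩
        constructor
        · rw [h2]
          ext x; simp
        · rw [h1]
          ext x
          by_cases hx : x = t
          · subst hx; simp [h]
          · simp [hx]

lemma sdiff_helper (X Y V : Finset (Int × Int)) :
    (X \ V) ∪ (Y \ (V ∪ X)) = (X ∪ Y) \ V := by
  ext x; simp; tauto

lemma expand_spec (nb : Int × Int → List (Int × Int)) (l : List (Int × Int))
    (vis : Finset (Int × Int)) :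
    (l.foldl (fun acc s => (nb s).foldl genAdd acc) ([], vis)).2
        = vis ∪ nbSet nb l.toFinset ∧
    (l.foldl (fun acc s => (nb s).foldl genAdd acc) ([], vis)).1.toFinset
        = nbSet nb l.toFinset \ vis := by
  suffices h : ∀ (acc : List (Int × Int) × Finset (Int × Int)),
      (l.foldl (fun acc s => (nb s).foldl genAdd acc) acc).2 = acc.2 ∪ nbSet nb l.toFinset ∧
      (l.foldl (fun acc s => (nb s).foldl genAdd acc) acc).1.toFinset
        = acc.1.toFinset ∪ (nbSet nb l.toFinset \ acc.2) by
    rcases h ([], vis) with ⟨h2, h1⟩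
    exact ⟨h2, by rw [h1]; simp⟩
  induction l with
  | nil => intro acc; simp [nbSet]
  | cons s l ih =>
      intro acc
      rcases addList_spec (nb s) acc with ⟨g2, g1⟩
      rcases ih ((nb s).foldl genAdd acc) with ⟨h2, h1⟩
      have hins : nbSet nb ((s :: l).toFinset) = (nb s).toFinset ∪ nbSet nb l.toFinset := by
        simp [nbSet, List.toFinset_cons, Finset.biUnion_insert]
      constructor
      · rw [List.foldl_cons, h2, g2, hins, Finset.union_assoc]
      · rw [List.foldl_cons, h1, g1, g2, hins, Finset.union_assoc, sdiff_helper]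

-- visited stays in the box
lemma lev_subset_box (nb : Int × Int → List (Int × Int)) (F0 : Finset (Int × Int))
    (hcl : ∀ s ∈ Box, ∀ t ∈ nb s, t ∈ Box) (hF0 : F0 ⊆ Box) (n : Nat) :
    (lev nb F0 n).1 ⊆ Box ∧ (lev nb F0 n).2 ⊆ Box := by
  induction n with
  | zero => exact ⟨hF0, hF0⟩
  | succ n ih =>
      have hnb : nbSet nb (lev nb F0 n).1 ⊆ Box := by
        intro t ht
        simp only [nbSet, Finset.mem_biUnion, List.mem_toFinset] at ht
        rcases ht with ⟨s, hs, hts⟩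
        exact hcl s (ih.1 hs) t hts
      rw [lev_succ]
      constructor
      · intro t ht
        simp only [Finset.mem_sdiff] at ht
        exact hnb ht.1
      · intro t ht
        simp only [Finset.mem_union] at ht
        rcases ht with h | h
        · exact ih.2 h
        · exact hnb h

lemma lev_empty_succ (nb : Int × Int → List (Int × Int)) (F0 : Finset (Int × Int)) (n : Nat)
    (h : (lev nb F0 n).1 = ∅) : ∀ m, (lev nb F0 (n + m)).1 = ∅ := by
  intro m
  induction m with
  | zero => exact h
  | succ m ih =>
      show (lev nb F0 (n + m + 1)).1 = ∅
      rw [lev_succ, ih]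
      simp [nbSet]

lemma lev_zero (nb : Int × Int → List (Int × Int)) (F0 : Finset (Int × Int)) :
    lev nb F0 0 = (F0, F0) := rfl

lemma genLoop_nil (nb : Int × Int → List (Int × Int)) (goal : Int × Int → Bool)
    (fuel : Nat) (depth : Int) (vis : Finset (Int × Int)) :
    genLoop nb goal fuel depth [] vis = none := by
  rw [genLoop]

lemma genLoop_cons (nb : Int × Int → List (Int × Int)) (goal : Int × Int → Bool)
    (fuel : Nat) (depth : Int) (x : Int × Int) (xs : List (Int × Int))
    (vis : Finset (Int × Int)) :
    genLoop nb goal fuel depth (x :: xs) vis =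
      if (x :: xs).any goal then some depth
      else
        match fuel with
        | 0 => none
        | fuel' + 1 =>
            genLoop nb goal fuel' (depth + 1)
              ((x :: xs).foldl (fun acc s => (nb s).foldl genAdd acc) ([], vis)).1
              ((x :: xs).foldl (fun acc s => (nb s).foldl genAdd acc) ([], vis)).2 := by
  rw [genLoop]

lemma any_iff_hit (nb : Int × Int → List (Int × Int)) (goal : Int × Int → Bool)
    (F0 : Finset (Int × Int)) (n : Nat) (l : List (Int × Int))
    (hl : l.toFinset = (lev nb F0 n).1) :
    l.any goal = true ↔ Hit nb goal F0 n := by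
  rw [List.any_eq_true]
  unfold Hit
  constructor
  · rintro ⟨v, hv, hg⟩
    exact ⟨v, hl ▸ List.mem_toFinset.mpr hv, hg⟩
  · rintro ⟨v, hv, hg⟩
    exact ⟨v, List.mem_toFinset.mp (hl ▸ hv), hg⟩

-- the card argument: a nonempty next level grows the visited set
lemma card_step (nb : Int × Int → List (Int × Int)) (F0 : Finset (Int × Int)) (n : Nat)
    (h : (lev nb F0 (n + 1)).1 ≠ ∅) :
    ((lev nb F0 n).2).card + 1 ≤ ((lev nb F0 (n + 1)).2).card := by
  rcases Finset.nonempty_iff_ne_empty.mpr h with ⟨x, hx⟩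
  rw [lev_succ] at hx
  simp only [Finset.mem_sdiff] at hx
  have hss : (lev nb F0 n).2 ⊂ (lev nb F0 (n + 1)).2 := by
    rw [lev_succ]
    constructor
    · intro y hy
      exact Finset.mem_union_left _ hy
    · intro hsub
      exact hx.2 (hsub (Finset.mem_union_right _ hx.1))
  exact Nat.succ_le_of_lt (Finset.card_lt_card hss)

-- when fuel is exhausted the whole box is visited, so the next level is empty
lemma fuel_out_empty (nb : Int × Int → List (Int × Int)) (F0 : Finset (Int × Int))
    (hcl : ∀ s ∈ Box, ∀ t ∈ nb s, t ∈ Box) (hF0 : F0 ⊆ Box) (n : Nat)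
    (hcard : Box.card ≤ ((lev nb F0 n).2).card) :
    (lev nb F0 (n + 1)).1 = ∅ := by
  have hsub := (lev_subset_box nb F0 hcl hF0 n).2
  have heq : (lev nb F0 n).2 = Box := Finset.eq_of_subset_of_card_le hsub hcard
  rw [lev_succ]
  have hnb : nbSet nb (lev nb F0 n).1 ⊆ Box := by
    intro t ht
    simp only [nbSet, Finset.mem_biUnion, List.mem_toFinset] at ht
    rcases ht with ⟨u, hu, htu⟩
    exact hcl u ((lev_subset_box nb F0 hcl hF0 n).1 hu) t htu
  rw [heq]
  exact Finset.sdiff_eq_empty_iff_subset.mpr hnb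

-- the main generic theorem, "found" half: if level n+k is the first goal level, the loop
-- started at round n answers depth + k
lemma genLoop_run_found (nb : Int × Int → List (Int × Int)) (goal : Int × Int → Bool)
    (F0 : Finset (Int × Int)) (hcl : ∀ s ∈ Box, ∀ t ∈ nb s, t ∈ Box) (hF0 : F0 ⊆ Box) :
    ∀ (fuel n k : Nat) (l : List (Int × Int)) (depth : Int),
    l.toFinset = (lev nb F0 n).1 →
    Box.card ≤ fuel + ((lev nb F0 n).2).card →
    Hit nb goal F0 (n + k) → (∀ j < k, ¬ Hit nb goal F0 (n + j)) →
    genLoop nb goal fuel depth l (lev nb F0 n).2 = some (depth + (k : Int)) := by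
  intro fuel n k
  induction k generalizing fuel n with
  | zero =>
      intro l depth hl hcard hhit _
      rcases hhit with ⟨v, hv, hg⟩
      have hvl : v ∈ l := List.mem_toFinset.mp (by rw [hl]; exact hv)
      cases l with
      | nil => simp at hvl
      | cons x xs =>
          rw [genLoop_cons, if_pos (List.any_eq_true.mpr ⟨v, hvl, hg⟩)]
          simp
  | succ j ih =>
      intro l depth hl hcard hhit hmin
      have hnotn : ¬ Hit nb goal F0 n := by
        have := hmin 0 (Nat.succ_pos j)
        simpa using this
      have hLn : l ≠ [] := by
        intro he
        subst he
        have : (lev nb F0 n).1 = ∅ := by rw [← hl]; simp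
        have := lev_empty_succ nb F0 n this (j + 1)
        rcases hhit with ⟨v, hv, -⟩
        rw [this] at hv
        simp at hv
      cases l with
      | nil => exact absurd rfl hLn
      | cons x xs =>
          rw [genLoop_cons,
            if_neg (fun ha => hnotn ((any_iff_hit nb goal F0 n _ hl).mp ha))]
          rcases expand_spec nb (x :: xs) (lev nb F0 n).2 with ⟨e2, e1⟩
          rw [hl] at e2 e1
          have hL1 : ((x :: xs).foldl (fun acc s => (nb s).foldl genAdd acc)
              ([], (lev nb F0 n).2)).1.toFinset = (lev nb F0 (n + 1)).1 := by
            rw [e1, lev_succ]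
          have hV1 : ((x :: xs).foldl (fun acc s => (nb s).foldl genAdd acc)
              ([], (lev nb F0 n).2)).2 = (lev nb F0 (n + 1)).2 := by
            rw [e2, lev_succ]
          have hL1ne : (lev nb F0 (n + 1)).1 ≠ ∅ := by
            intro he
            have := lev_empty_succ nb F0 (n + 1) he j
            rcases (by rw [show n + (j + 1) = n + 1 + j by omega] at hhit; exact hhit :
              Hit nb goal F0 (n + 1 + j)) with ⟨v, hv, -⟩
            rw [this] at hv
            simp at hv
          cases fuel with
          | zero =>
              exfalso
              have hemp := fuel_out_empty nb F0 hcl hF0 n (by omega)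
              exact hL1ne hemp
          | succ fuel' =>
              have hcard' : Box.card ≤ fuel' + ((lev nb F0 (n + 1)).2).card := by
                have := card_step nb F0 n hL1ne
                omega
              have hhit' : Hit nb goal F0 (n + 1 + j) := by
                rw [show n + 1 + j = n + (j + 1) by omega]
                exact hhit
              have hmin' : ∀ i < j, ¬ Hit nb goal F0 (n + 1 + i) := by
                intro i hi
                rw [show n + 1 + i = n + (i + 1) by omega]
                exact hmin (i + 1) (by omega)
              have hrec := ih fuel' (n + 1) _ (depth + 1) hL1 hcard' hhit' hmin'
              rw [hV1]
              show genLoop nb goal fuel' (depth + 1)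
                  ((x :: xs).foldl (fun acc s => (nb s).foldl genAdd acc)
                    ([], (lev nb F0 n).2)).1 (lev nb F0 (n + 1)).2
                = some (depth + ((j + 1 : Nat) : Int))
              rw [hrec]
              congr 1
              push_cast
              ring

-- the "not found" half: if no level from n on contains a goal state, the loop returns none
lemma genLoop_run_none (nb : Int × Int → List (Int × Int)) (goal : Int × Int → Bool)
    (F0 : Finset (Int × Int)) (hcl : ∀ s ∈ Box, ∀ t ∈ nb s, t ∈ Box) (hF0 : F0 ⊆ Box) :
    ∀ (fuel n : Nat) (l : List (Int × Int)) (depth : Int),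
    l.toFinset = (lev nb F0 n).1 →
    Box.card ≤ fuel + ((lev nb F0 n).2).card →
    (∀ k, ¬ Hit nb goal F0 (n + k)) →
    genLoop nb goal fuel depth l (lev nb F0 n).2 = none := by
  intro fuel
  induction fuel with
  | zero =>
      intro n l depth hl hcard hnone
      cases l with
      | nil => exact genLoop_nil _ _ _ _ _
      | cons x xs =>
          rw [genLoop_cons,
            if_neg (fun ha => hnone 0 (by simpa using (any_iff_hit nb goal F0 n _ hl).mp ha))]
  | succ fuel ih =>
      intro n l depth hl hcard hnone
      cases l with
      | nil => exact genLoop_nil _ _ _ _ _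
      | cons x xs =>
          rw [genLoop_cons,
            if_neg (fun ha => hnone 0 (by simpa using (any_iff_hit nb goal F0 n _ hl).mp ha))]
          rcases expand_spec nb (x :: xs) (lev nb F0 n).2 with ⟨e2, e1⟩
          rw [hl] at e2 e1
          have hL1 : ((x :: xs).foldl (fun acc s => (nb s).foldl genAdd acc)
              ([], (lev nb F0 n).2)).1.toFinset = (lev nb F0 (n + 1)).1 := by
            rw [e1, lev_succ]
          have hV1 : ((x :: xs).foldl (fun acc s => (nb s).foldl genAdd acc)
              ([], (lev nb F0 n).2)).2 = (lev nb F0 (n + 1)).2 := by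
            rw [e2, lev_succ]
          by_cases hL1e : (lev nb F0 (n + 1)).1 = ∅
          · have : ((x :: xs).foldl (fun acc s => (nb s).foldl genAdd acc)
                ([], (lev nb F0 n).2)).1 = [] := by
              rw [← List.toFinset_eq_empty_iff, hL1, hL1e]
            rw [this]
            exact genLoop_nil _ _ _ _ _
          · have hcard' : Box.card ≤ fuel + ((lev nb F0 (n + 1)).2).card := by
              have := card_step nb F0 n hL1e
              omega
            have hnone' : ∀ k, ¬ Hit nb goal F0 (n + 1 + k) := by
              intro k
              rw [show n + 1 + k = n + (k + 1) by omega]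
              exact hnone (k + 1)
            rw [hV1]
            exact ih (n + 1) _ (depth + 1) hL1 hcard' hnone'

-- membership in the level sequence = first-reach
lemma mem_lev (nb : Int × Int → List (Int × Int)) (F0 : Finset (Int × Int)) (n : Nat) :
    (∀ v, v ∈ (lev nb F0 n).1 ↔ (Reach nb F0 n v ∧ ∀ m < n, ¬ Reach nb F0 m v)) ∧
    (∀ v, v ∈ (lev nb F0 n).2 ↔ ∃ m ≤ n, Reach nb F0 m v) := by
  induction n with
  | zero =>
      have h0 : ∀ v, Reach nb F0 0 v ↔ v ∈ F0 := by
        intro v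
        constructor
        · rintro ⟨u, hu, hp⟩
          cases hp
          exact hu
        · intro hv
          exact ⟨v, hv, PathN.refl v⟩
      constructor
      · intro v
        rw [lev_zero]
        constructor
        · intro hv
          exact ⟨(h0 v).mpr hv, by omega⟩
        · rintro ⟨hr, -⟩
          exact (h0 v).mp hr
      · intro v
        rw [lev_zero]
        constructor
        · intro hv
          exact ⟨0, le_refl 0, (h0 v).mpr hv⟩
        · rintro ⟨m, hm, hr⟩
          interval_cases m
          exact (h0 v).mp hr
  | succ n ih =>
      have hstep : ∀ v, (∃ s ∈ (lev nb F0 n).1, v ∈ nb s) → Reach nb F0 (n + 1) v := by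
        rintro v ⟨s, hs, hvs⟩
        rcases ((ih.1 s).mp hs).1 with ⟨u, hu, hp⟩
        exact ⟨u, hu, PathN.snoc hp hvs⟩
      constructor
      · intro v
        rw [lev_succ]
        simp only [Finset.mem_sdiff]
        constructor
        · rintro ⟨hnb, hnv⟩
          simp only [nbSet, Finset.mem_biUnion, List.mem_toFinset] at hnb
          rcases hnb with ⟨u, hu, hvu⟩
          refine ⟨hstep v ⟨u, hu, hvu⟩, ?_⟩
          intro m hm hr
          exact hnv ((ih.2 v).mpr ⟨m, by omega, hr⟩)
        · rintro ⟨hr, hmin⟩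
          rcases hr with ⟨u, hu, hp⟩
          cases hp with
          | snoc hp' hw =>
              rename_i s
              constructor
              · simp only [nbSet, Finset.mem_biUnion, List.mem_toFinset]
                refine ⟨s, ?_, hw⟩
                rw [ih.1 s]
                refine ⟨⟨u, hu, hp'⟩, ?_⟩
                intro m hm hrm
                rcases hrm with ⟨u', hu', hp''⟩
                exact hmin (m + 1) (by omega) ⟨u', hu', PathN.snoc hp'' hw⟩
              · intro hv
                rcases (ih.2 v).mp hv with ⟨m, hm, hr'⟩
                exact hmin m (by omega) hr'
      · intro v
        rw [lev_succ]
        simp only [Finset.mem_union]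
        constructor
        · rintro (hv | hv)
          · rcases (ih.2 v).mp hv with ⟨m, hm, hr⟩
            exact ⟨m, by omega, hr⟩
          · simp only [nbSet, Finset.mem_biUnion, List.mem_toFinset] at hv
            rcases hv with ⟨u, hu, hvu⟩
            exact ⟨n + 1, le_refl _, hstep v ⟨u, hu, hvu⟩⟩
        · rintro ⟨m, hm, hr⟩
          by_cases hmn : m ≤ n
          · exact Or.inl ((ih.2 v).mpr ⟨m, hmn, hr⟩)
          · have hm1 : m = n + 1 := by omega
            subst hm1
            rcases hr with ⟨u, hu, hp⟩
            cases hp with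
            | snoc hp' hw =>
                rename_i s
                by_cases hks : ∃ k, k < n ∧ Reach nb F0 k s
                · rcases hks with ⟨k, hk, ⟨u', hu', hp''⟩⟩
                  exact Or.inl ((ih.2 v).mpr ⟨k + 1, by omega, u', hu', PathN.snoc hp'' hw⟩)
                · refine Or.inr ?_
                  simp only [nbSet, Finset.mem_biUnion, List.mem_toFinset]
                  refine ⟨s, ?_, hw⟩
                  rw [ih.1 s]
                  refine ⟨⟨u, hu, hp'⟩, ?_⟩
                  intro k hk hrk
                  exact hks ⟨k, hk, hrk⟩

-- a first Hit level is a first GHit level and vice versa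
lemma hit_imp_ghit (nb : Int × Int → List (Int × Int)) (goal : Int × Int → Bool)
    (F0 : Finset (Int × Int)) (m : Nat) (h : Hit nb goal F0 m) : GHit nb goal F0 m := by
  rcases h with ⟨v, hv, hg⟩
  exact ⟨v, ((mem_lev nb F0 m).1 v |>.mp hv).1, hg⟩

lemma ghit_min_hit (nb : Int × Int → List (Int × Int)) (goal : Int × Int → Bool)
    (F0 : Finset (Int × Int)) (m : Nat) (h : GHit nb goal F0 m)
    (hmin : ∀ j < m, ¬ GHit nb goal F0 j) : Hit nb goal F0 m := by
  rcases h with ⟨v, hr, hg⟩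
  refine ⟨v, ((mem_lev nb F0 m).1 v).mpr ⟨hr, ?_⟩, hg⟩
  intro j hj hrj
  exact hmin j hj ⟨v, hrj, hg⟩

-- ---------- duality between the forward and the reverse graph ----------

lemma mem_box (s : Int × Int) : s ∈ Box ↔ (2 ≤ s.1 ∧ s.1 ≤ 2000 ∧ 1 ≤ s.2 ∧ s.2 ≤ 2000) := by
  cases s with
  | mk d b =>
    simp only [Box, Finset.mem_product, Finset.mem_Icc]
    tauto

lemma mem_nbF (s t : Int × Int) :
    t ∈ nbF s ↔ ((2 ≤ s.1 + s.2 ∧ s.1 + s.2 ≤ 2000 ∧ t = (s.1 + s.2, s.2)) ∨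
                 (2 ≤ s.1 - 1 ∧ s.1 - 1 ≤ 2000 ∧ t = (s.1 - 1, s.2)) ∨
                 (2 ≤ s.1 ∧ s.1 ≤ 2000 ∧ t = (s.1, s.1))) := by
  simp only [nbF, List.mem_append]
  constructor
  · rintro ((h | h) | h)
    · split_ifs at h with hc
      · simp only [List.mem_singleton] at h
        exact Or.inl ⟨hc.1, hc.2, h⟩
      · simp at h
    · split_ifs at h with hc
      · simp only [List.mem_singleton] at h
        exact Or.inr (Or.inl ⟨hc.1, hc.2, h⟩)
      · simp at h
    · split_ifs at h with hc
      · simp only [List.mem_singleton] at h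
        exact Or.inr (Or.inr ⟨hc.1, hc.2, h⟩)
      · simp at h
  · rintro (⟨h1, h2, rfl⟩ | ⟨h1, h2, rfl⟩ | ⟨h1, h2, rfl⟩)
    · exact Or.inl (Or.inl (by rw [if_pos ⟨h1, h2⟩]; simp))
    · exact Or.inl (Or.inr (by rw [if_pos ⟨h1, h2⟩]; simp))
    · exact Or.inr (by rw [if_pos ⟨h1, h2⟩]; simp)

lemma mem_nbR (s t : Int × Int) :
    t ∈ nbR s ↔ ((s.1 - s.2 ≥ 2 ∧ t = (s.1 - s.2, s.2)) ∨
                 (s.1 + 1 ≤ 2000 ∧ t = (s.1 + 1, s.2)) ∨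
                 (s.1 = s.2 ∧ ∃ b2, 1 ≤ b2 ∧ b2 ≤ 2000 ∧ t = (s.1, b2))) := by
  simp only [nbR, List.mem_append]
  constructor
  · rintro ((h | h) | h)
    · left; split_ifs at h with hc
      · simp at h; exact ⟨hc, by simp [h]⟩
      · simp at h
    · right; left; split_ifs at h with hc
      · simp at h; exact ⟨hc, by simp [h]⟩
      · simp at h
    · right; right; split_ifs at h with hc
      · simp only [List.mem_map] at h
        rcases h with ⟨b2, hb2, rfl⟩
        rw [PySem.List.mem_pyRange_one] at hb2
        exact ⟨hc, b2, hb2.1, by omega, rfl⟩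
      · simp at h
  · rintro (⟨h1, rfl⟩ | ⟨h1, rfl⟩ | ⟨h1, b2, hb1, hb2, rfl⟩)
    · exact Or.inl (Or.inl (by rw [if_pos h1]; simp))
    · exact Or.inl (Or.inr (by rw [if_pos h1]; simp))
    · refine Or.inr (by rw [if_pos h1]; simp only [List.mem_map]
                        exact ⟨b2, PySem.List.mem_pyRange_one.mpr ⟨hb1, by omega⟩, rfl⟩)

lemma nbF_closed : ∀ s ∈ Box, ∀ t ∈ nbF s, t ∈ Box := by
  intro s hs t ht
  rw [mem_box] at hs ⊢
  rw [mem_nbF] at ht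
  rcases ht with ⟨h1, h2, rfl⟩ | ⟨h1, h2, rfl⟩ | ⟨h1, h2, rfl⟩ <;> simp <;> omega

lemma nbR_closed : ∀ s ∈ Box, ∀ t ∈ nbR s, t ∈ Box := by
  intro s hs t ht
  rw [mem_box] at hs ⊢
  rw [mem_nbR] at ht
  rcases ht with ⟨h1, rfl⟩ | ⟨h1, rfl⟩ | ⟨h1, b2, hb1, hb2, rfl⟩ <;> simp <;> omega

lemma dual (s t : Int × Int) (hs : s ∈ Box) (ht : t ∈ Box) :
    t ∈ nbF s ↔ s ∈ nbR t := by
  rw [mem_box] at hs ht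
  rw [mem_nbF, mem_nbR]
  obtain ⟨d, b⟩ := s
  obtain ⟨x, y⟩ := t
  simp only [Prod.mk.injEq]
  constructor
  · rintro (⟨h1, h2, rfl, rfl⟩ | ⟨h1, h2, rfl, rfl⟩ | ⟨h1, h2, rfl, rfl⟩)
    · exact Or.inl ⟨by omega, by omega, rfl⟩
    · exact Or.inr (Or.inl ⟨by omega, by omega, rfl⟩)
    · exact Or.inr (Or.inr ⟨rfl, b, by omega, by omega, rfl, rfl⟩)
  · rintro (⟨h1, rfl, rfl⟩ | ⟨h1, rfl, rfl⟩ | ⟨h1, b2, hb1, hb2, rfl, rfl⟩)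
    · exact Or.inl ⟨by omega, by omega, by omega, rfl⟩
    · exact Or.inr (Or.inl ⟨by omega, by omega, by omega, rfl⟩)
    · exact Or.inr (Or.inr ⟨by omega, by omega, by omega, by omega⟩)

lemma path_box (nb : Int × Int → List (Int × Int)) (hcl : ∀ s ∈ Box, ∀ t ∈ nb s, t ∈ Box)
    {n : Nat} {u v : Int × Int} (hu : u ∈ Box) (hp : PathN nb n u v) : v ∈ Box := by
  induction hp with
  | refl => exact hu
  | snoc hp hw ih => exact hcl _ (ih hu) _ hw

lemma pathN_cons (nb : Int × Int → List (Int × Int)) :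
    ∀ (n : Nat) (u w : Int × Int),
    PathN nb (n + 1) u w ↔ ∃ v, v ∈ nb u ∧ PathN nb n v w := by
  intro n
  induction n with
  | zero =>
      intro u w
      constructor
      · intro h
        cases h with
        | snoc hp hw =>
            cases hp
            exact ⟨w, hw, PathN.refl w⟩
      · rintro ⟨v, hv, hp⟩
        cases hp
        exact PathN.snoc (PathN.refl u) hv
  | succ n ih =>
      intro u w
      constructor
      · intro h
        cases h with
        | snoc hp hw =>
            rcases (ih u _).mp hp with ⟨v, hv, hp'⟩
            exact ⟨v, hv, PathN.snoc hp' hw⟩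
      · rintro ⟨v, hv, hp⟩
        cases hp with
        | snoc hp' hw =>
            exact PathN.snoc ((ih u _).mpr ⟨v, hv, hp'⟩) hw

lemma path_dual (u : Int × Int) (hu : u ∈ Box) :
    ∀ (n : Nat) (w : Int × Int), w ∈ Box → (PathN nbF n u w ↔ PathN nbR n w u) := by
  intro n
  induction n with
  | zero =>
      intro w _
      constructor
      · intro h; cases h; exact PathN.refl _
      · intro h; cases h; exact PathN.refl _
  | succ n ih =>
      intro w hw
      constructor
      · intro h
        cases h with
        | snoc hp hwnb =>
            rename_i v
            have hv : v ∈ Box := path_box nbF nbF_closed hu hp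
            have hvR : v ∈ nbR w := (dual v w hv hw).mp hwnb
            exact (pathN_cons nbR n w u).mpr ⟨v, hvR, (ih v hv).mp hp⟩
      · intro h
        rcases (pathN_cons nbR n w u).mp h with ⟨v, hvR, hp⟩
        have hv : v ∈ Box := nbR_closed w hw v hvR
        have hwF : w ∈ nbF v := (dual v w hv hw).mpr hvR
        exact PathN.snoc ((ih v hv).mpr hp) hwF

-- ---------- 2D-table lemmas shared by both simulations ----------

-- the tables stay rectangular 2001 × 2001
def Shape {α : Type} (v : Array (Array α)) : Prop :=
  v.size = 2001 ∧ ∀ k : Nat, k < 2001 → ((v[k]?).getD #[]).size = 2001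

lemma shape_replicate {α : Type} (x : α) :
    Shape (Array.replicate 2001 (Array.replicate 2001 x)) := by
  refine ⟨Array.size_replicate, fun k hk => ?_⟩
  simp [hk]

lemma shape_aset {α : Type} (v : Array (Array α)) (i j : Int) (x : α) (h : Shape v) :
    Shape (pvAset v i j x) := by
  obtain ⟨h1, h2⟩ := h
  refine ⟨by simp [pvAset, Array.size_modify, h1], fun k hk => ?_⟩
  have hget := h2 k hk
  simp only [pvAset, Array.getElem?_modify]
  by_cases hik : i.toNat = k
  · subst hik
    have hlt : i.toNat < v.size := by omega
    rw [Array.getElem?_eq_getElem hlt]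
    rw [Array.getElem?_eq_getElem hlt] at hget
    simpa [Array.size_setIfInBounds] using hget
  · simp [hik, hget]

lemma aget_replicate {α : Type} (dflt x : α) (i j : Int)
    (hi : 0 ≤ i) (hi2 : i ≤ 2000) (hj : 0 ≤ j) (hj2 : j ≤ 2000) :
    pvAget dflt (Array.replicate 2001 (Array.replicate 2001 x)) i j = x := by
  have h1 : i.toNat < 2001 := by omega
  have h2 : j.toNat < 2001 := by omega
  simp [pvAget, h1, h2]

lemma aget_aset {α : Type} (dflt : α) (v : Array (Array α)) (x : α) (i j i' j' : Int)
    (hsh : Shape v) (hi : 0 ≤ i) (hi2 : i ≤ 2000) (hj : 0 ≤ j) (hj2 : j ≤ 2000)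
    (hi' : 0 ≤ i') (hj' : 0 ≤ j') :
    pvAget dflt (pvAset v i j x) i' j' =
      if i' = i ∧ j' = j then x else pvAget dflt v i' j' := by
  obtain ⟨h1, h2⟩ := hsh
  have hiv : i.toNat < v.size := by omega
  simp only [pvAget, pvAset, Array.getElem?_modify]
  by_cases hik : i.toNat = i'.toNat
  · have hii : i' = i := by omega
    rw [← hik, Array.getElem?_eq_getElem hiv]
    have hrow : v[i.toNat].size = 2001 := by
      have := h2 i.toNat (by omega)
      rwa [Array.getElem?_eq_getElem hiv] at this
    simp only [Option.map_some, Option.getD_some]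
    by_cases hjk : j.toNat = j'.toNat
    · have hjj : j' = j := by omega
      simp [hrow, show j.toNat < 2001 by omega, hii, hjj]
    · have hjj : ¬ (j' = j) := by omega
      simp [hjk, hii, hjj]
  · have hii : ¬ (i' = i) := by omega
    simp [hik, hii]

-- every state both searches ever hold: display in [2,2000], board in [1,2000]
def GoodSt (s : Int × Int) : Prop := 2 ≤ s.1 ∧ s.1 ≤ 2000 ∧ 1 ≤ s.2 ∧ s.2 ≤ 2000

def pvAnn (depth : Int) (s : Int × Int) : Int × Int × Int := (depth, s.1, s.2)

-- A's distance table vs the abstract visited set, over every cell the program reads: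
-- visited cells hold a value ≤ s (= current depth + 1), unvisited cells still hold 10^9
def VRel (v : Array (Array Int)) (vis : Finset (Int × Int)) (s : Int) : Prop :=
  ∀ i j : Int, 2 ≤ i → i ≤ 2000 → 1 ≤ j → j ≤ 2000 →
    ((i, j) ∈ vis ∧ pvAget 0 v i j ≤ s) ∨
    ((i, j) ∉ vis ∧ pvAget 0 v i j = 1000000000)

lemma vrel_mono (v : Array (Array Int)) (vis : Finset (Int × Int)) (s t : Int)
    (hst : s ≤ t) (h : VRel v vis s) : VRel v vis t := by
  intro i j h1 h2 h3 h4
  rcases h i j h1 h2 h3 h4 with ⟨hw, hv⟩ | ⟨hw, hv⟩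
  · exact Or.inl ⟨hw, le_trans hv hst⟩
  · exact Or.inr ⟨hw, hv⟩

-- one conditional child step of A, as a standalone function on the loop state
def stepA1 (sec nd nb : Int) (st : List (Int × Int × Int) × Array (Array Int)) :
    List (Int × Int × Int) × Array (Array Int) :=
  if 2 ≤ nd ∧ nd ≤ 2000 ∧ pvAget 0 st.2 nd nb > sec + 1 then
    ((sec + 1, nd, nb) :: st.1, pvAset st.2 nd nb (sec + 1))
  else st

lemma bfsStepA_eq (sec d b : Int) (pend : List (Int × Int × Int)) (v : Array (Array Int)) :
    bfsStepA sec d b pend v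
      = stepA1 sec d d (stepA1 sec (d - 1) b (stepA1 sec (d + b) b (pend, v))) := rfl

-- the genLoop-side analogue: one conditional child (bounds guard outside, genAdd inside)
def stepG1 (c : Prop) [Decidable c] (t : Int × Int)
    (acc : List (Int × Int) × Finset (Int × Int)) : List (Int × Int) × Finset (Int × Int) :=
  if c then genAdd acc t else acc

lemma nbF_foldl (s : Int × Int) (acc : List (Int × Int) × Finset (Int × Int)) :
    (nbF s).foldl genAdd acc =
      stepG1 (2 ≤ s.1 ∧ s.1 ≤ 2000) (s.1, s.1)
        (stepG1 (2 ≤ s.1 - 1 ∧ s.1 - 1 ≤ 2000) (s.1 - 1, s.2)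
          (stepG1 (2 ≤ s.1 + s.2 ∧ s.1 + s.2 ≤ 2000) (s.1 + s.2, s.2) acc)) := by
  unfold nbF stepG1
  split_ifs <;> simp [List.foldl_append]

-- one conditional child step of A matches one of genLoop
lemma childSimA (depth nd nb : Int) (stA : List (Int × Int × Int) × Array (Array Int))
    (accG : List (Int × Int) × Finset (Int × Int))
    (hRel : VRel stA.2 accG.2 (depth + 1)) (hsv : Shape stA.2)
    (hnb1 : 1 ≤ nb) (hnb2 : nb ≤ 2000) (hd : depth + 1 < 1000000000) :
    ∃ new : List (Int × Int),
      (stepG1 (2 ≤ nd ∧ nd ≤ 2000) (nd, nb) accG).1 = accG.1 ++ new ∧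
      (stepA1 depth nd nb stA).1 = (new.map (pvAnn (depth + 1))).reverse ++ stA.1 ∧
      (∀ s ∈ new, GoodSt s) ∧
      VRel (stepA1 depth nd nb stA).2 (stepG1 (2 ≤ nd ∧ nd ≤ 2000) (nd, nb) accG).2
        (depth + 1) ∧
      Shape (stepA1 depth nd nb stA).2 := by
  by_cases hnd : 2 ≤ nd ∧ nd ≤ 2000
  · rcases hRel nd nb hnd.1 hnd.2 hnb1 hnb2 with ⟨hw, hv⟩ | ⟨hw, hv⟩
    · -- already visited: both sides skip
      have eA : stepA1 depth nd nb stA = stA := by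
        unfold stepA1; rw [if_neg]; rintro ⟨-, -, h⟩; omega
      have eB : stepG1 (2 ≤ nd ∧ nd ≤ 2000) (nd, nb) accG = accG := by
        unfold stepG1
        rw [if_pos hnd, genAdd_of_mem hw]
      exact ⟨[], by rw [eB]; simp, by rw [eA]; simp, by simp,
        by rw [eA, eB]; exact hRel, by rw [eA]; exact hsv⟩
    · -- fresh cell: both sides mark it and append the child
      have hvgt : pvAget 0 stA.2 nd nb > depth + 1 := by omega
      have eA : stepA1 depth nd nb stA
          = ((depth + 1, nd, nb) :: stA.1, pvAset stA.2 nd nb (depth + 1)) := by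
        unfold stepA1; rw [if_pos ⟨hnd.1, hnd.2, hvgt⟩]
      have eB : stepG1 (2 ≤ nd ∧ nd ≤ 2000) (nd, nb) accG
          = (accG.1 ++ [(nd, nb)], insert (nd, nb) accG.2) := by
        unfold stepG1
        rw [if_pos hnd, genAdd_of_not_mem hw]
      refine ⟨[(nd, nb)], by rw [eB], by rw [eA]; rfl, ?_, ?_, ?_⟩
      · intro s hs; simp only [List.mem_singleton] at hs; subst hs
        exact ⟨hnd.1, hnd.2, hnb1, hnb2⟩
      · rw [eA, eB]
        intro i j h1 h2 h3 h4
        rw [aget_aset 0 stA.2 _ nd nb i j hsv (by omega) hnd.2 (by omega) hnb2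
          (by omega) (by omega)]
        by_cases hij : i = nd ∧ j = nb
        · rw [if_pos hij]
          exact Or.inl ⟨Finset.mem_insert.mpr (Or.inl (by rw [hij.1, hij.2])), le_refl _⟩
        · rw [if_neg hij]
          rcases hRel i j h1 h2 h3 h4 with ⟨hm, hle⟩ | ⟨hm, he⟩
          · exact Or.inl ⟨Finset.mem_insert.mpr (Or.inr hm), hle⟩
          · refine Or.inr ⟨?_, he⟩
            intro hmem
            rcases Finset.mem_insert.mp hmem with he' | he'
            · exact hij ⟨congrArg Prod.fst he', congrArg Prod.snd he'⟩
            · exact hm he'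
      · rw [eA]; exact shape_aset _ _ _ _ hsv
  · -- out of range: both sides skip
    have eA : stepA1 depth nd nb stA = stA := by
      unfold stepA1; rw [if_neg]; rintro ⟨h1, h2, -⟩; exact hnd ⟨h1, h2⟩
    have eB : stepG1 (2 ≤ nd ∧ nd ≤ 2000) (nd, nb) accG = accG := by
      unfold stepG1; rw [if_neg hnd]
    exact ⟨[], by rw [eB]; simp, by rw [eA]; simp, by simp,
      by rw [eA, eB]; exact hRel, by rw [eA]; exact hsv⟩

-- one full pop of A (bfsStepA) matches one frontier state of genLoop nbF
lemma stepSimA (depth d b : Int) (pend : List (Int × Int × Int)) (accG : List (Int × Int) × Finset (Int × Int))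
    (v : Array (Array Int))
    (hRel : VRel v accG.2 (depth + 1)) (hsv : Shape v)
    (hg : GoodSt (d, b)) (hd : depth + 1 < 1000000000) :
    ∃ new : List (Int × Int),
      ((nbF (d, b)).foldl genAdd accG).1 = accG.1 ++ new ∧
      (bfsStepA depth d b pend v).1 = (new.map (pvAnn (depth + 1))).reverse ++ pend ∧
      (∀ s ∈ new, GoodSt s) ∧
      VRel (bfsStepA depth d b pend v).2 ((nbF (d, b)).foldl genAdd accG).2 (depth + 1) ∧
      Shape (bfsStepA depth d b pend v).2 := by
  obtain ⟨hd1, hd2, hb1, hb2⟩ := hg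
  rw [bfsStepA_eq, nbF_foldl]
  obtain ⟨n1, hB1, hA1, hg1, hR1, hsv1⟩ :=
    childSimA depth (d + b) b (pend, v) accG hRel hsv hb1 hb2 hd
  obtain ⟨n2, hB2, hA2, hg2, hR2, hsv2⟩ :=
    childSimA depth (d - 1) b _ _ hR1 hsv1 hb1 hb2 hd
  obtain ⟨n3, hB3, hA3, hg3, hR3, hsv3⟩ :=
    childSimA depth d d _ _ hR2 hsv2 (by omega) hd2 hd
  refine ⟨n1 ++ n2 ++ n3, ?_, ?_, ?_, hR3, hsv3⟩
  · rw [hB3, hB2, hB1]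
    simp
  · rw [hA3, hA2, hA1]
    simp
  · intro s hs
    rcases List.mem_append.mp hs with hs' | hs'
    · rcases List.mem_append.mp hs' with h | h
      · exact hg1 s h
      · exact hg2 s h
    · exact hg3 s hs'

-- ---------- simulation: port A = genLoop nbF ----------

def goalF (target : Int) : Int × Int → Bool := fun s => decide (s.1 = target)

-- equation lemmas for A's loop
lemma loopA_cons (target : Int) (fuel : Nat) (sec d b : Int)
    (rest pend : List (Int × Int × Int)) (v : Array (Array Int)) :
    bfsLoopA target fuel ((sec, d, b) :: rest) pend v =
      if d = target then some sec
      else bfsLoopA target fuel rest (bfsStepA sec d b pend v).1 (bfsStepA sec d b pend v).2 := by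
  rw [bfsLoopA]

lemma loopA_nil_nil (target : Int) (fuel : Nat) (v : Array (Array Int)) :
    bfsLoopA target fuel [] [] v = none := by
  rw [bfsLoopA]

lemma loopA_zero (target : Int) (p : Int × Int × Int) (ps : List (Int × Int × Int))
    (v : Array (Array Int)) :
    bfsLoopA target 0 [] (p :: ps) v = none := by
  rw [bfsLoopA]

lemma loopA_flip (target : Int) (fuel : Nat) (p : Int × Int × Int)
    (ps : List (Int × Int × Int)) (v : Array (Array Int)) :
    bfsLoopA target (fuel + 1) [] (p :: ps) v =
      bfsLoopA target fuel ((p :: ps).reverse) [] v := by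
  rw [bfsLoopA]

-- if some state of the current level has display = target, A answers `depth`
lemma innerFound (target : Int) (fuel : Nat) (depth : Int) :
    ∀ (rem : List (Int × Int)) (pend : List (Int × Int × Int)) (v : Array (Array Int)),
    (∃ s ∈ rem, s.1 = target) →
    bfsLoopA target fuel (rem.map (pvAnn depth)) pend v = some depth := by
  intro rem
  induction rem with
  | nil => intro pend v h; simp at h
  | cons s rest ih =>
      intro pend v h
      obtain ⟨d, b⟩ := s
      simp only [List.map_cons, pvAnn, loopA_cons]
      by_cases hdt : d = target
      · simp [hdt]
      · simp only [if_neg hdt]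
        apply ih
        rcases h with ⟨t, ht, htt⟩
        rcases List.mem_cons.mp ht with rfl | ht'
        · exact absurd htt hdt
        · exact ⟨t, ht', htt⟩

-- consuming one whole level of A's queue is genLoop's fold over the frontier
lemma innerSimA (target : Int) (fuel : Nat) (depth : Int)
    (hd : depth + 1 < 1000000000) :
    ∀ (rem : List (Int × Int)) (accG : List (Int × Int) × Finset (Int × Int))
      (v : Array (Array Int)),
    VRel v accG.2 (depth + 1) → Shape v →
    (∀ s ∈ rem, GoodSt s) → (∀ s ∈ accG.1, GoodSt s) → (∀ s ∈ rem, s.1 ≠ target) →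
    ∃ v', bfsLoopA target fuel (rem.map (pvAnn depth))
            ((accG.1.map (pvAnn (depth + 1))).reverse) v
          = bfsLoopA target fuel []
              (((rem.foldl (fun acc s => (nbF s).foldl genAdd acc) accG).1.map
                (pvAnn (depth + 1))).reverse) v' ∧
          VRel v' (rem.foldl (fun acc s => (nbF s).foldl genAdd acc) accG).2 (depth + 1) ∧
          Shape v' ∧
          (∀ s ∈ (rem.foldl (fun acc s => (nbF s).foldl genAdd acc) accG).1, GoodSt s) := by
  intro rem
  induction rem with
  | nil =>
      intro accG v hRel hsv _ hacc _
      exact ⟨v, rfl, hRel, hsv, hacc⟩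
  | cons s rest ih =>
      intro accG v hRel hsv hgood hacc hnot
      obtain ⟨d, b⟩ := s
      obtain ⟨new, hB, hA, hnew, hR, hsv'⟩ :=
        stepSimA depth d b ((accG.1.map (pvAnn (depth + 1))).reverse) accG v
          hRel hsv (hgood (d, b) (List.mem_cons_self)) hd
      simp only [List.map_cons, pvAnn, loopA_cons,
        if_neg (hnot (d, b) (List.mem_cons_self))]
      have hpend : (bfsStepA depth d b ((accG.1.map (pvAnn (depth + 1))).reverse) v).1
          = (((nbF (d, b)).foldl genAdd accG).1.map (pvAnn (depth + 1))).reverse := by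
        rw [hA, hB]; simp
      rw [hpend]
      have hfold : (((d, b) :: rest).foldl (fun acc s => (nbF s).foldl genAdd acc) accG)
          = rest.foldl (fun acc s => (nbF s).foldl genAdd acc)
              ((nbF (d, b)).foldl genAdd accG) := by simp
      rw [hfold]
      apply ih ((nbF (d, b)).foldl genAdd accG) _ hR hsv'
        (fun t ht => hgood t (List.mem_cons_of_mem _ ht))
        (by rw [hB]; intro t ht
            rcases List.mem_append.mp ht with h | h
            · exact hacc t h
            · exact hnew t h)
        (fun t ht => hnot t (List.mem_cons_of_mem _ ht))

-- the level-by-level simulation of A by genLoop nbF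
lemma outerSimA (target : Int) :
    ∀ (fuel : Nat) (depth : Int) (frontier : List (Int × Int))
      (v : Array (Array Int)) (vis : Finset (Int × Int)),
    VRel v vis (depth + 1) → Shape v → (∀ s ∈ frontier, GoodSt s) →
    depth + (fuel : Int) ≤ 999999998 →
    bfsLoopA target fuel (frontier.map (pvAnn depth)) [] v
      = genLoop nbF (goalF target) fuel depth frontier vis := by
  intro fuel
  induction fuel with
  | zero =>
      intro depth frontier v vis hRel hsv hgood hbound
      cases frontier with
      | nil => simp [loopA_nil_nil, genLoop_nil]
      | cons f0 fs =>
          rw [genLoop_cons]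
          by_cases hany : (f0 :: fs).any (goalF target) = true
          · rw [if_pos hany]
            refine innerFound target 0 depth (f0 :: fs) [] v ?_
            rcases List.any_eq_true.mp hany with ⟨t, ht, htg⟩
            exact ⟨t, ht, by simpa [goalF] using htg⟩
          · rw [if_neg hany]
            show _ = (none : Option Int)
            have hnot : ∀ s ∈ f0 :: fs, s.1 ≠ target := by
              intro t ht htt
              exact hany (List.any_eq_true.mpr ⟨t, ht, by simp [goalF, htt]⟩)
            have hdlt : depth + 1 < 1000000000 := by
              have : ((0 : Nat) : Int) = 0 := rfl
              omega
            obtain ⟨v', hEq, hR', hsv', hgood'⟩ :=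
              innerSimA target 0 depth hdlt (f0 :: fs) ([], vis) v hRel hsv hgood
                (by simp) hnot
            rw [show ((([] : List (Int × Int)).map (pvAnn (depth + 1))).reverse)
                  = ([] : List (Int × Int × Int)) from rfl] at hEq
            rw [hEq]
            cases hn : ((((f0 :: fs).foldl (fun acc s => (nbF s).foldl genAdd acc)
                ([], vis)).1.map (pvAnn (depth + 1))).reverse) with
            | nil => exact loopA_nil_nil target 0 v'
            | cons y ys => exact loopA_zero target y ys v'
  | succ fuel ih =>
      intro depth frontier v vis hRel hsv hgood hbound
      cases frontier with
      | nil => simp [loopA_nil_nil, genLoop_nil]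
      | cons f0 fs =>
          rw [genLoop_cons]
          by_cases hany : (f0 :: fs).any (goalF target) = true
          · rw [if_pos hany]
            refine innerFound target (fuel + 1) depth (f0 :: fs) [] v ?_
            rcases List.any_eq_true.mp hany with ⟨t, ht, htg⟩
            exact ⟨t, ht, by simpa [goalF] using htg⟩
          · rw [if_neg hany]
            show bfsLoopA target (fuel + 1) (List.map (pvAnn depth) (f0 :: fs)) [] v
              = genLoop nbF (goalF target) fuel (depth + 1)
                  ((f0 :: fs).foldl (fun acc s => (nbF s).foldl genAdd acc) ([], vis)).1
                  ((f0 :: fs).foldl (fun acc s => (nbF s).foldl genAdd acc) ([], vis)).2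
            have hnot : ∀ s ∈ f0 :: fs, s.1 ≠ target := by
              intro t ht htt
              exact hany (List.any_eq_true.mpr ⟨t, ht, by simp [goalF, htt]⟩)
            have hdlt : depth + 1 < 1000000000 := by
              have h0 : (0 : Int) ≤ ((fuel + 1 : Nat) : Int) := by positivity
              omega
            obtain ⟨v', hEq, hR', hsv', hgood'⟩ :=
              innerSimA target (fuel + 1) depth hdlt (f0 :: fs) ([], vis) v hRel hsv hgood
                (by simp) hnot
            rw [show ((([] : List (Int × Int)).map (pvAnn (depth + 1))).reverse)
                  = ([] : List (Int × Int × Int)) from rfl] at hEq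
            rw [hEq]
            cases hn : ((f0 :: fs).foldl (fun acc s => (nbF s).foldl genAdd acc) ([], vis)).1 with
            | nil => simp [loopA_nil_nil, genLoop_nil]
            | cons x xs =>
                have hL : ((x :: xs).map (pvAnn (depth + 1))).reverse ≠ [] := by simp
                obtain ⟨y, ys, hys⟩ := List.exists_cons_of_ne_nil hL
                rw [hys, loopA_flip, ← hys, List.reverse_reverse]
                rw [hn] at hgood'
                exact ih (depth + 1) (x :: xs) v'
                  (((f0 :: fs).foldl (fun acc s => (nbF s).foldl genAdd acc) ([], vis)).2)
                  (vrel_mono _ _ _ _ (by omega) hR') hsv' hgood'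
                  (by push_cast at hbound ⊢; omega)

lemma simA (target : Int) :
    bfs target = genLoop nbF (goalF target) pvFuel 2 [((2 : Int), (1 : Int))]
      ({((2 : Int), (1 : Int))} : Finset (Int × Int)) := by
  unfold bfs
  have hg : Shape (Array.replicate 2001 (Array.replicate 2001 (1000000000 : Int))) :=
    shape_replicate _
  have hg1 : Shape (pvAset (Array.replicate 2001 (Array.replicate 2001 (1000000000 : Int)))
      1 1 1) := shape_aset _ _ _ _ hg
  have hsv : Shape (pvAset (pvAset (Array.replicate 2001
      (Array.replicate 2001 (1000000000 : Int))) 1 1 1) 2 1 2) := shape_aset _ _ _ _ hg1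
  have hRel : VRel (pvAset (pvAset (Array.replicate 2001
        (Array.replicate 2001 (1000000000 : Int))) 1 1 1) 2 1 2)
      ({((2 : Int), (1 : Int))} : Finset (Int × Int)) (2 + 1) := by
    intro i j h1 h2 h3 h4
    rw [aget_aset 0 _ _ 2 1 i j hg1 (by norm_num) (by norm_num) (by norm_num) (by norm_num)
      (by omega) (by omega)]
    by_cases hij : i = 2 ∧ j = 1
    · rw [if_pos hij]
      refine Or.inl ⟨?_, by norm_num⟩
      rw [hij.1, hij.2]
      exact Finset.mem_singleton_self _
    · rw [if_neg hij]
      refine Or.inr ⟨?_, ?_⟩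
      · intro hmem
        rw [Finset.mem_singleton] at hmem
        exact hij ⟨congrArg Prod.fst hmem, congrArg Prod.snd hmem⟩
      · rw [aget_aset 0 _ _ 1 1 i j hg (by norm_num) (by norm_num) (by norm_num) (by norm_num)
          (by omega) (by omega)]
        rw [if_neg (by omega)]
        exact aget_replicate _ _ _ _ (by omega) h2 (by omega) h4
  have hgood : ∀ s ∈ [((2 : Int), (1 : Int))], GoodSt s := by
    intro s hs
    simp only [List.mem_singleton] at hs
    subst hs
    exact ⟨by norm_num, by norm_num, by norm_num, by norm_num⟩
  have hbound : (2 : Int) + (pvFuel : Int) ≤ 999999998 := by norm_num [pvFuel]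
  simpa [pvAnn] using outerSimA target pvFuel 2 [((2 : Int), (1 : Int))] _ _
    hRel hsv hgood hbound

-- ---------- simulation: port B = genLoop nbR ----------

def goalR : Int × Int → Bool := fun s => decide (s = ((2 : Int), (1 : Int)))

def srcList (target : Int) : List (Int × Int) :=
  if 2 ≤ target ∧ target ≤ 2000 then (PySem.List.pyRange 1 2001 1).map (fun b => (target, b))
  else []

-- B's boolean table agrees with the abstract visited set on every cell the program reads
def BRel (w : Array (Array Bool)) (vis : Finset (Int × Int)) : Prop :=
  ∀ i j : Int, 2 ≤ i → i ≤ 2000 → 1 ≤ j → j ≤ 2000 →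
    (pvAget false w i j = true ↔ (i, j) ∈ vis)

-- the joint invariant of the two loop states
def InvB (stB : Array (Int × Int) × Array (Array Bool))
    (accG : List (Int × Int) × Finset (Int × Int)) : Prop :=
  stB.1.toList = accG.1 ∧ BRel stB.2 accG.2 ∧ Shape stB.2 ∧ (∀ x ∈ accG.1, GoodSt x)

-- one guarded mark-and-push of B, as a standalone function on the loop state
def stepB1 (c : Prop) [Decidable c] (t : Int × Int)
    (st : Array (Int × Int) × Array (Array Bool)) :
    Array (Int × Int) × Array (Array Bool) :=
  if c ∧ pvAget false st.2 t.1 t.2 = false then (st.1.push t, pvAset st.2 t.1 t.2 true)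
  else st

lemma altStep_eq (stB : Array (Int × Int) × Array (Array Bool)) (d b : Int) :
    altStep stB (d, b) =
      (if d = b then
        (PySem.List.pyRange 1 2001 1).foldl (fun a b2 =>
            if pvAget false a.2 d b2 = false then (a.1.push (d, b2), pvAset a.2 d b2 true)
            else a)
          (stepB1 (d + 1 ≤ 2000) (d + 1, b) (stepB1 (d - b ≥ 2) (d - b, b) stB))
      else stepB1 (d + 1 ≤ 2000) (d + 1, b) (stepB1 (d - b ≥ 2) (d - b, b) stB)) := rfl

lemma nbR_foldl (s : Int × Int) (acc : List (Int × Int) × Finset (Int × Int)) :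
    (nbR s).foldl genAdd acc =
      (if s.1 = s.2 then
        ((PySem.List.pyRange 1 2001 1).map (fun b2 => (s.1, b2))).foldl genAdd
          (stepG1 (s.1 + 1 ≤ 2000) (s.1 + 1, s.2)
            (stepG1 (s.1 - s.2 ≥ 2) (s.1 - s.2, s.2) acc))
      else stepG1 (s.1 + 1 ≤ 2000) (s.1 + 1, s.2)
            (stepG1 (s.1 - s.2 ≥ 2) (s.1 - s.2, s.2) acc)) := by
  unfold nbR stepG1
  split_ifs <;> simp [List.foldl_append]

-- one guarded child of B matches one of genLoop
lemma childSimB (c : Prop) [Decidable c] (nd nb : Int)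
    (stB : Array (Int × Int) × Array (Array Bool))
    (accG : List (Int × Int) × Finset (Int × Int))
    (hInv : InvB stB accG) (hnd : c → 2 ≤ nd ∧ nd ≤ 2000)
    (hnb1 : 1 ≤ nb) (hnb2 : nb ≤ 2000) :
    InvB (stepB1 c (nd, nb) stB) (stepG1 c (nd, nb) accG) := by
  obtain ⟨hlist, hRel, hsw, hgood⟩ := hInv
  by_cases hc : c
  · obtain ⟨hnd1, hnd2⟩ := hnd hc
    by_cases hvis : (nd, nb) ∈ accG.2
    · have htab : pvAget false stB.2 nd nb = true :=
        (hRel nd nb hnd1 hnd2 hnb1 hnb2).mpr hvis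
      have eB : stepB1 c (nd, nb) stB = stB := by
        unfold stepB1
        rw [if_neg]
        rintro ⟨-, h⟩
        rw [htab] at h
        cases h
      have eG : stepG1 c (nd, nb) accG = accG := by
        unfold stepG1
        rw [if_pos hc, genAdd_of_mem hvis]
      rw [eB, eG]
      exact ⟨hlist, hRel, hsw, hgood⟩
    · have htab : pvAget false stB.2 nd nb = false := by
        rcases Bool.eq_false_or_eq_true (pvAget false stB.2 nd nb) with h | h
        · exact absurd ((hRel nd nb hnd1 hnd2 hnb1 hnb2).mp h) hvis
        · exact h
      have eB : stepB1 c (nd, nb) stB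
          = (stB.1.push (nd, nb), pvAset stB.2 nd nb true) := by
        unfold stepB1
        rw [if_pos ⟨hc, htab⟩]
      have eG : stepG1 c (nd, nb) accG
          = (accG.1 ++ [(nd, nb)], insert (nd, nb) accG.2) := by
        unfold stepG1
        rw [if_pos hc, genAdd_of_not_mem hvis]
      rw [eB, eG]
      refine ⟨by simp [hlist], ?_, shape_aset _ _ _ _ hsw, ?_⟩
      · intro i j h1 h2 h3 h4
        rw [aget_aset false stB.2 _ nd nb i j hsw (by omega) hnd2 (by omega) hnb2
          (by omega) (by omega)]
        by_cases hij : i = nd ∧ j = nb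
        · rw [if_pos hij]
          simp only [true_iff]
          exact Finset.mem_insert.mpr (Or.inl (by rw [hij.1, hij.2]))
        · rw [if_neg hij]
          rw [hRel i j h1 h2 h3 h4]
          constructor
          · intro hm
            exact Finset.mem_insert.mpr (Or.inr hm)
          · intro hm
            rcases Finset.mem_insert.mp hm with he | he
            · exact absurd ⟨congrArg Prod.fst he, congrArg Prod.snd he⟩ hij
            · exact he
      · intro x hx
        rcases List.mem_append.mp hx with h | h
        · exact hgood x h
        · simp only [List.mem_singleton] at h
          subst h
          exact ⟨hnd1, hnd2, hnb1, hnb2⟩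
  · have eB : stepB1 c (nd, nb) stB = stB := by
      unfold stepB1
      rw [if_neg]
      rintro ⟨h, -⟩
      exact hc h
    have eG : stepG1 c (nd, nb) accG = accG := by
      unfold stepG1
      rw [if_neg hc]
    rw [eB, eG]
    exact ⟨hlist, hRel, hsw, hgood⟩

-- the reverse-copy inner loop of B matches genLoop's fold over the mapped range
lemma copyFoldSim (d : Int) (hd1 : 2 ≤ d) (hd2 : d ≤ 2000) :
    ∀ (l : List Int), (∀ b2 ∈ l, 1 ≤ b2 ∧ b2 ≤ 2000) →
    ∀ (stB : Array (Int × Int) × Array (Array Bool))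
      (accG : List (Int × Int) × Finset (Int × Int)),
    InvB stB accG →
    InvB (l.foldl (fun a b2 =>
            if pvAget false a.2 d b2 = false then (a.1.push (d, b2), pvAset a.2 d b2 true)
            else a) stB)
      ((l.map (fun b2 => (d, b2))).foldl genAdd accG) := by
  intro l
  induction l with
  | nil => intro _ stB accG hInv; exact hInv
  | cons b2 l ih =>
      intro hb stB accG hInv
      have hstep := childSimB True d b2 stB accG hInv (fun _ => ⟨hd1, hd2⟩)
        (hb b2 List.mem_cons_self).1 (hb b2 List.mem_cons_self).2
      have eB : (if pvAget false stB.2 d b2 = false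
            then (stB.1.push (d, b2), pvAset stB.2 d b2 true) else stB)
          = stepB1 True (d, b2) stB := by
        unfold stepB1
        simp
      have eG : genAdd accG (d, b2) = stepG1 True (d, b2) accG := by
        unfold stepG1
        rw [if_pos trivial]
      rw [List.map_cons, List.foldl_cons, List.foldl_cons, eB, eG]
      exact ih (fun x hx => hb x (List.mem_cons_of_mem _ hx)) _ _ hstep

-- one frontier state of B matches one of genLoop
lemma stepSimB (s : Int × Int) (hg : GoodSt s)
    (stB : Array (Int × Int) × Array (Array Bool))
    (accG : List (Int × Int) × Finset (Int × Int)) (hInv : InvB stB accG) :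
    InvB (altStep stB s) ((nbR s).foldl genAdd accG) := by
  obtain ⟨d, b⟩ := s
  obtain ⟨hd1, hd2, hb1, hb2⟩ := hg
  rw [altStep_eq, nbR_foldl]
  have h1 := childSimB (d - b ≥ 2) (d - b) b stB accG hInv
    (fun hc => ⟨by omega, by omega⟩) hb1 hb2
  have h2 := childSimB (d + 1 ≤ 2000) (d + 1) b _ _ h1
    (fun hc => ⟨by omega, by omega⟩) hb1 hb2
  by_cases hdb : d = b
  · rw [if_pos hdb, if_pos hdb]
    exact copyFoldSim d hd1 hd2 _
      (fun b2 hb2' => by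
        rw [PySem.List.mem_pyRange_one] at hb2'
        exact ⟨by omega, by omega⟩) _ _ h2
  · rw [if_neg hdb, if_neg hdb]
    exact h2

-- one whole level
lemma innerSimB :
    ∀ (rem : List (Int × Int)) (stB : Array (Int × Int) × Array (Array Bool))
      (accG : List (Int × Int) × Finset (Int × Int)),
    InvB stB accG → (∀ x ∈ rem, GoodSt x) →
    InvB (rem.foldl altStep stB)
      (rem.foldl (fun acc s => (nbR s).foldl genAdd acc) accG) := by
  intro rem
  induction rem with
  | nil => intro stB accG hInv _; exact hInv
  | cons s rest ih =>
      intro stB accG hInv hgood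
      rw [List.foldl_cons, List.foldl_cons]
      exact ih _ _ (stepSimB s (hgood s List.mem_cons_self) stB accG hInv)
        (fun x hx => hgood x (List.mem_cons_of_mem _ hx))

-- equation lemmas for B's loop
lemma altLoop_nil (target : Int) (fuel : Nat) (depth : Int) (w : Array (Array Bool)) :
    altLoop target fuel depth [] w = none := by
  rw [altLoop]

lemma altLoop_cons (target : Int) (fuel : Nat) (depth : Int) (x : Int × Int)
    (xs : List (Int × Int)) (w : Array (Array Bool)) :
    altLoop target fuel depth (x :: xs) w =
      if (x :: xs).contains ((2 : Int), (1 : Int)) then some depth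
      else
        match fuel with
        | 0 => none
        | fuel' + 1 =>
            altLoop target fuel' (depth + 1) ((x :: xs).foldl altStep (#[], w)).1.toList
              ((x :: xs).foldl altStep (#[], w)).2 := by
  rw [altLoop]

-- Python's `(2, 1) in frontier` is genLoop's goal test
lemma contains_eq_any (l : List (Int × Int)) :
    l.contains ((2 : Int), (1 : Int)) = l.any goalR := by
  induction l with
  | nil => rfl
  | cons x xs ih =>
      rw [List.contains_cons, List.any_cons, ih]
      congr 1
      by_cases hx : x = ((2 : Int), (1 : Int))
      · simp [hx, goalR]
      · simp [goalR, hx, Ne.symm hx]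

-- the level-by-level simulation of B by genLoop nbR
lemma outerSimB (target : Int) :
    ∀ (fuel : Nat) (depth : Int) (frontier : List (Int × Int))
      (w : Array (Array Bool)) (vis : Finset (Int × Int)),
    BRel w vis → Shape w → (∀ s ∈ frontier, GoodSt s) →
    altLoop target fuel depth frontier w = genLoop nbR goalR fuel depth frontier vis := by
  intro fuel
  induction fuel with
  | zero =>
      intro depth frontier w vis hRel hsw hgood
      cases frontier with
      | nil => rw [altLoop_nil, genLoop_nil]
      | cons f0 fs =>
          rw [altLoop_cons, genLoop_cons, contains_eq_any]
  | succ fuel ih =>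
      intro depth frontier w vis hRel hsw hgood
      cases frontier with
      | nil => rw [altLoop_nil, genLoop_nil]
      | cons f0 fs =>
          rw [altLoop_cons, genLoop_cons, contains_eq_any]
          by_cases h : (f0 :: fs).any goalR = true
          · simp only [if_pos h]
          · simp only [if_neg h]
            have hInv0 : InvB ((#[] : Array (Int × Int)), w) (([], vis)) :=
              ⟨rfl, hRel, hsw, by simp⟩
            obtain ⟨hlist, hRel', hsw', hgood'⟩ :=
              innerSimB (f0 :: fs) (#[], w) ([], vis) hInv0 hgood
            show altLoop target fuel (depth + 1)
                ((f0 :: fs).foldl altStep (#[], w)).1.toList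
                ((f0 :: fs).foldl altStep (#[], w)).2
              = genLoop nbR goalR fuel (depth + 1)
                ((f0 :: fs).foldl (fun acc s => (nbR s).foldl genAdd acc) ([], vis)).1
                ((f0 :: fs).foldl (fun acc s => (nbR s).foldl genAdd acc) ([], vis)).2
            rw [hlist]
            exact ih (depth + 1) _ _ _ hRel' hsw' hgood'

-- the initial sources of B: list, table and set agree
lemma initSim (target : Int) (h2 : 2 ≤ target) (h2000 : target ≤ 2000) :
    ∀ (l : List Int), (∀ b ∈ l, 1 ≤ b ∧ b ≤ 2000) →
    ∀ (stB : Array (Int × Int) × Array (Array Bool)), Shape stB.2 →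
    (l.foldl (fun a b => (a.1.push (target, b), pvAset a.2 target b true)) stB).1.toList
        = stB.1.toList ++ l.map (fun b => (target, b)) ∧
    Shape (l.foldl (fun a b => (a.1.push (target, b), pvAset a.2 target b true)) stB).2 ∧
    (∀ i j : Int, 2 ≤ i → i ≤ 2000 → 1 ≤ j → j ≤ 2000 →
      (pvAget false
          (l.foldl (fun a b => (a.1.push (target, b), pvAset a.2 target b true)) stB).2 i j
            = true
        ↔ (pvAget false stB.2 i j = true ∨ (i = target ∧ j ∈ l)))) := by
  intro l
  induction l with
  | nil =>
      intro _ stB hsw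
      refine ⟨by simp, hsw, ?_⟩
      intro i j h1 h2' h3 h4
      simp
  | cons b l ih =>
      intro hb stB hsw
      have hb1 := (hb b List.mem_cons_self).1
      have hb2 := (hb b List.mem_cons_self).2
      have hsw' : Shape (pvAset stB.2 target b true) := shape_aset _ _ _ _ hsw
      obtain ⟨i1, i2, i3⟩ := ih (fun x hx => hb x (List.mem_cons_of_mem _ hx))
        (stB.1.push (target, b), pvAset stB.2 target b true) hsw'
      rw [List.foldl_cons]
      refine ⟨by rw [i1]; simp, i2, ?_⟩
      intro i j h1 h2' h3 h4
      rw [i3 i j h1 h2' h3 h4]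
      rw [aget_aset false stB.2 _ target b i j hsw (by omega) h2000 (by omega) hb2
        (by omega) (by omega)]
      by_cases hij : i = target ∧ j = b
      · rw [if_pos hij]
        simp [hij.1, hij.2]
      · rw [if_neg hij]
        constructor
        · rintro (hm | ⟨hm1, hm2⟩)
          · exact Or.inl hm
          · exact Or.inr ⟨hm1, List.mem_cons_of_mem _ hm2⟩
        · rintro (hm | ⟨hm1, hm2⟩)
          · exact Or.inl hm
          · rcases List.mem_cons.mp hm2 with he | he
            · exact absurd ⟨hm1, he⟩ hij
            · exact Or.inr ⟨hm1, he⟩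

lemma simB (target : Int) :
    bfs_alt target = genLoop nbR goalR pvFuel 2 (srcList target)
      (srcList target).toFinset := by
  have hbfs : bfs_alt target = altLoop target pvFuel 2
      (if 2 ≤ target ∧ target ≤ 2000 then
        (PySem.List.pyRange 1 2001 1).foldl
          (fun a b => (a.1.push (target, b), pvAset a.2 target b true))
          ((#[] : Array (Int × Int)), Array.replicate 2001 (Array.replicate 2001 false))
      else ((#[] : Array (Int × Int)), Array.replicate 2001 (Array.replicate 2001 false))).1.toList
      (if 2 ≤ target ∧ target ≤ 2000 then
        (PySem.List.pyRange 1 2001 1).foldl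
          (fun a b => (a.1.push (target, b), pvAset a.2 target b true))
          ((#[] : Array (Int × Int)), Array.replicate 2001 (Array.replicate 2001 false))
      else ((#[] : Array (Int × Int)), Array.replicate 2001 (Array.replicate 2001 false))).2 := rfl
  rw [hbfs]
  unfold srcList
  by_cases hrange : 2 ≤ target ∧ target ≤ 2000
  · simp only [if_pos hrange]
    obtain ⟨i1, i2, i3⟩ := initSim target hrange.1 hrange.2 (PySem.List.pyRange 1 2001 1)
      (fun b hb => by rw [PySem.List.mem_pyRange_one] at hb; exact ⟨by omega, by omega⟩)
      ((#[] : Array (Int × Int)), Array.replicate 2001 (Array.replicate 2001 false))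
      (shape_replicate false)
    rw [i1]
    have hRel : BRel
        ((PySem.List.pyRange 1 2001 1).foldl
          (fun a b => (a.1.push (target, b), pvAset a.2 target b true))
          ((#[] : Array (Int × Int)), Array.replicate 2001 (Array.replicate 2001 false))).2
        ((PySem.List.pyRange 1 2001 1).map (fun b => (target, b))).toFinset := by
      intro i j h1 h2 h3 h4
      rw [i3 i j h1 h2 h3 h4]
      rw [aget_replicate false false i j (by omega) h2 (by omega) h4]
      simp only [List.mem_toFinset, List.mem_map]
      constructor
      · rintro (hm | ⟨hm1, hm2⟩)
        · cases hm
        · exact ⟨j, hm2, by rw [hm1]⟩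
      · rintro ⟨b, hb, he⟩
        have he1 : i = target := (congrArg Prod.fst he).symm
        have he2 : j = b := (congrArg Prod.snd he).symm
        exact Or.inr ⟨he1, by rwa [he2]⟩
    have hgood : ∀ x ∈ (PySem.List.pyRange 1 2001 1).map (fun b => (target, b)), GoodSt x := by
      intro x hx
      simp only [List.mem_map] at hx
      rcases hx with ⟨b, hb, rfl⟩
      rw [PySem.List.mem_pyRange_one] at hb
      exact ⟨hrange.1, hrange.2, by omega, by omega⟩
    simp only []
    exact outerSimB target pvFuel 2 _ _ _ hRel i2 hgood
  · simp only [if_neg hrange]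
    rw [altLoop_nil, genLoop_nil]

-- ---------- the two searches find the same minimal level ----------

lemma ghit_dual (target : Int) (m : Nat) :
    GHit nbF (goalF target) ({((2 : Int), (1 : Int))} : Finset (Int × Int)) m
      ↔ GHit nbR goalR (srcList target).toFinset m := by
  have h21 : ((2 : Int), (1 : Int)) ∈ Box := by rw [mem_box]; norm_num
  constructor
  · rintro ⟨v, ⟨u, hu, hp⟩, hg⟩
    simp only [Finset.mem_singleton] at hu
    subst hu
    have hgv : v.1 = target := by simpa [goalF] using hg
    have hv : v ∈ Box := path_box nbF nbF_closed h21 hp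
    have hpR : PathN nbR m v ((2 : Int), (1 : Int)) := (path_dual _ h21 m v hv).mp hp
    refine ⟨((2 : Int), (1 : Int)), ⟨v, ?_, hpR⟩, by simp [goalR]⟩
    rw [mem_box] at hv
    unfold srcList
    rw [if_pos ⟨by omega, by omega⟩]
    simp only [List.mem_toFinset, List.mem_map]
    refine ⟨v.2, PySem.List.mem_pyRange_one.mpr ⟨by omega, by omega⟩, ?_⟩
    rw [← hgv]
  · rintro ⟨v, ⟨u, hu, hp⟩, hg⟩
    have hgv : v = ((2 : Int), (1 : Int)) := by simpa [goalR] using hg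
    subst hgv
    unfold srcList at hu
    split_ifs at hu with hrange
    · simp only [List.mem_toFinset, List.mem_map] at hu
      rcases hu with ⟨b, hb, rfl⟩
      rw [PySem.List.mem_pyRange_one] at hb
      have huB : (target, b) ∈ Box := by rw [mem_box]; simp; omega
      have hpF : PathN nbF m ((2 : Int), (1 : Int)) (target, b) :=
        (path_dual _ h21 m _ huB).mpr hp
      exact ⟨(target, b), ⟨((2 : Int), (1 : Int)), Finset.mem_singleton_self _, hpF⟩,
        by simp [goalF]⟩
    · simp at hu

-- ===== VERDICT (by name: the statement is the Claim_ definition above) =====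
theorem bfs_spec : Claim_equal_bfs := by
  intro target _
  unfold Spec_bfs
  rw [simA, simB]
  classical
  have h21F : ({((2 : Int), (1 : Int))} : Finset (Int × Int)) ⊆ Box := by
    intro x hx
    simp only [Finset.mem_singleton] at hx
    subst hx
    rw [mem_box]
    norm_num
  have hsrc : (srcList target).toFinset ⊆ Box := by
    intro x hx
    unfold srcList at hx
    split_ifs at hx with h
    · simp only [List.mem_toFinset, List.mem_map] at hx
      rcases hx with ⟨b, hb, rfl⟩
      rw [PySem.List.mem_pyRange_one] at hb
      rw [mem_box]
      simp
      omega
    · simp at hx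
  have hcardBox : Box.card ≤ pvFuel := by
    unfold Box pvFuel
    rw [Finset.card_product]
    simp only [Int.card_Icc]
    decide
  have hF0lA : ([((2 : Int), (1 : Int))]).toFinset
      = (lev nbF {((2 : Int), (1 : Int))} 0).1 := by
    rw [lev_zero]
    simp
  have hF0lB : (srcList target).toFinset = (lev nbR (srcList target).toFinset 0).1 := by
    rw [lev_zero]
  have hcardA : Box.card ≤ pvFuel + ((lev nbF {((2 : Int), (1 : Int))} 0).2).card := by
    omega
  have hcardB : Box.card ≤ pvFuel + ((lev nbR (srcList target).toFinset 0).2).card := by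
    omega
  by_cases h : ∃ m', GHit nbF (goalF target) ({((2 : Int), (1 : Int))} : Finset (Int × Int)) m'
  · have hG := Nat.find_spec h
    have hGmin : ∀ j < Nat.find h,
        ¬ GHit nbF (goalF target) ({((2 : Int), (1 : Int))} : Finset (Int × Int)) j :=
      fun j hj => Nat.find_min h hj
    have hHit : Hit nbF (goalF target) ({((2 : Int), (1 : Int))} : Finset (Int × Int))
        (0 + Nat.find h) := by
      rw [Nat.zero_add]
      exact ghit_min_hit _ _ _ _ hG hGmin
    have hHmin : ∀ j < Nat.find h,
        ¬ Hit nbF (goalF target) ({((2 : Int), (1 : Int))} : Finset (Int × Int)) (0 + j) := by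
      intro j hj hh
      rw [Nat.zero_add] at hh
      exact hGmin j hj (hit_imp_ghit _ _ _ j hh)
    have hGR : GHit nbR goalR (srcList target).toFinset (Nat.find h) :=
      (ghit_dual target _).mp hG
    have hGRmin : ∀ j < Nat.find h, ¬ GHit nbR goalR (srcList target).toFinset j :=
      fun j hj hg => hGmin j hj ((ghit_dual target j).mpr hg)
    have hHitR : Hit nbR goalR (srcList target).toFinset (0 + Nat.find h) := by
      rw [Nat.zero_add]
      exact ghit_min_hit _ _ _ _ hGR hGRmin
    have hHminR : ∀ j < Nat.find h, ¬ Hit nbR goalR (srcList target).toFinset (0 + j) := by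
      intro j hj hh
      rw [Nat.zero_add] at hh
      exact hGRmin j hj (hit_imp_ghit _ _ _ j hh)
    have eA := genLoop_run_found nbF (goalF target) _ nbF_closed h21F pvFuel 0 (Nat.find h)
      [((2 : Int), (1 : Int))] 2 hF0lA hcardA hHit hHmin
    have eB := genLoop_run_found nbR goalR _ nbR_closed hsrc pvFuel 0 (Nat.find h)
      (srcList target) 2 hF0lB hcardB hHitR hHminR
    simp only [lev_zero] at eA eB
    rw [eA, eB]
  · have hnoneA : ∀ k, ¬ Hit nbF (goalF target)
        ({((2 : Int), (1 : Int))} : Finset (Int × Int)) (0 + k) := by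
      intro k hh
      rw [Nat.zero_add] at hh
      exact h ⟨k, hit_imp_ghit _ _ _ k hh⟩
    have hnoneB : ∀ k, ¬ Hit nbR goalR (srcList target).toFinset (0 + k) := by
      intro k hh
      rw [Nat.zero_add] at hh
      exact h ⟨k, (ghit_dual target k).mpr (hit_imp_ghit _ _ _ k hh)⟩
    have eA := genLoop_run_none nbF (goalF target) _ nbF_closed h21F pvFuel 0
      [((2 : Int), (1 : Int))] 2 hF0lA hcardA hnoneA
    have eB := genLoop_run_none nbR goalR _ nbR_closed hsrc pvFuel 0
      (srcList target) 2 hF0lB hcardB hnoneB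
    simp only [lev_zero] at eA eB
    rw [eA, eB]
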